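-- pv_equiv track=rewrite | github.com/blackdome-ai/blackdome-sentinel | collectors/audit_collector.py | _select_target_path
-- ===== SOURCE A (Python) =====
-- from collections.abc import Iterable
--
-- def _select_target_path(paths: Iterable[str], audit_key: str) -> str:
--     candidates = [path for path in paths if path and path != "(null)"]
--     if not candidates:
--         return ""
--
--     for path in reversed(candidates):
--         if audit_key == "systemd_persist" and "/systemd/" in path:
--             return path
--         if audit_key in {"cron_persist", "user_cron"} and "cron" in path:
--             return path
--         if audit_key == "ssh_keys" and path.endswith("authorized_keys"):
--             return path
--         if audit_key == "shell_rc" and path in {"/root/.bashrc", "/root/.profile"}: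
--             return path
--         if audit_key == "rc_local" and path.endswith("/etc/rc.local"):
--             return path
--         if audit_key == "initd_persist" and "/init.d/" in path:
--             return path
--
--     return candidates[-1]
-- ===== SOURCE B (Python) =====
-- _PREDS = {
--     "systemd_persist": lambda p: "/systemd/" in p,
--     "cron_persist": lambda p: "cron" in p,
--     "user_cron": lambda p: "cron" in p,
--     "ssh_keys": lambda p: p.endswith("authorized_keys"),
--     "shell_rc": lambda p: p in ("/root/.bashrc", "/root/.profile"),
--     "rc_local": lambda p: p.endswith("/etc/rc.local"),
--     "initd_persist": lambda p: "/init.d/" in p,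
-- }
--
-- def _select_target_path(paths, audit_key):
--     # single forward pass: keep the last valid path and the last valid path
--     # matching the key's predicate; no intermediate list, no reversal
--     pred = _PREDS.get(audit_key)
--     last = ""
--     hit = None
--     for p in paths:
--         if p and p != "(null)":
--             last = p
--             if pred is not None and pred(p):
--                 hit = p
--     return hit if hit is not None else last
-- ===== Notes on version B (the rewrite author's own statement) =====
-- stated objective: alternative
-- what changed: Replaces A's filter-then-reversed-scan with an if-chain by a predicate table looked up once plus a single forward fold that tracks the last valid path and the last predicate match, building no intermediate list and never reversing.
import Mathlib
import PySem

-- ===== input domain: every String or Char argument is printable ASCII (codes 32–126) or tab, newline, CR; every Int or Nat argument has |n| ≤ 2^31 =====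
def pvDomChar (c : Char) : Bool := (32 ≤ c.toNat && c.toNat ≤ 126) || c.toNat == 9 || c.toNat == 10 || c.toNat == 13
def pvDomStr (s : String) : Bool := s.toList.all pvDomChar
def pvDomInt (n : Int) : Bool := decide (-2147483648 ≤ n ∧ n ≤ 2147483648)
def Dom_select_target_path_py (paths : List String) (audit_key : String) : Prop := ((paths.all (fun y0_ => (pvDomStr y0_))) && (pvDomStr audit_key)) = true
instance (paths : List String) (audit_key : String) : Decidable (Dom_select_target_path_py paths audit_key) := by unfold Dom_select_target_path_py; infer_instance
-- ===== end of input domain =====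

-- B replaces A's filter + reversed scan with an if-chain by a predicate-table
-- lookup and one forward fold tracking the last valid path and last match.

-- ===== PORT A =====
-- the 'for path in reversed(candidates)' loop with its if-chain of early returns
def pvALoop (audit_key : String) : List String → Option String
  | [] => none
  | p :: rest =>
    if audit_key == "systemd_persist" && PySem.Str.isIn "/systemd/" p then some p
    else if (audit_key == "cron_persist" || audit_key == "user_cron") && PySem.Str.isIn "cron" p then some p
    else if audit_key == "ssh_keys" && PySem.Str.endswith p "authorized_keys" then some p
    else if audit_key == "shell_rc" && (p == "/root/.bashrc" || p == "/root/.profile") then some p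
    else if audit_key == "rc_local" && PySem.Str.endswith p "/etc/rc.local" then some p
    else if audit_key == "initd_persist" && PySem.Str.isIn "/init.d/" p then some p
    else pvALoop audit_key rest

def select_target_path_py (paths : List String) (audit_key : String) : String :=
  let candidates := paths.filter (fun p => p != "" && p != "(null)")
  if candidates.isEmpty then ""
  else
    match pvALoop audit_key candidates.reverse with
    | some p => p
    | none => candidates.getLastD ""   -- candidates[-1]; candidates is nonempty here

-- ===== PORT B =====
def pvPreds : PySem.Dict String (String → Bool) := PySem.Dict.ofList
  [ ("systemd_persist", fun p => PySem.Str.isIn "/systemd/" p)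
  , ("cron_persist", fun p => PySem.Str.isIn "cron" p)
  , ("user_cron", fun p => PySem.Str.isIn "cron" p)
  , ("ssh_keys", fun p => PySem.Str.endswith p "authorized_keys")
  , ("shell_rc", fun p => p == "/root/.bashrc" || p == "/root/.profile")
  , ("rc_local", fun p => PySem.Str.endswith p "/etc/rc.local")
  , ("initd_persist", fun p => PySem.Str.isIn "/init.d/" p) ]

def select_target_path_py_alt (paths : List String) (audit_key : String) : String :=
  let pred := pvPreds.get? audit_key
  let st := paths.foldl
    (fun (st : String × Option String) p =>
      if p != "" && p != "(null)" then
        (p, if (match pred with | some f => f p | none => false) then some p else st.2)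
      else st)
    ("", none)
  match st.2 with
  | some h => h
  | none => st.1

-- ===== PRECONDITION & SPEC =====
def Spec_select_target_path_py (paths : List String) (audit_key : String) (out : String) : Prop := out = select_target_path_py_alt paths audit_key
instance (paths : List String) (audit_key : String) (out : String) : Decidable (Spec_select_target_path_py paths audit_key out) := by unfold Spec_select_target_path_py; infer_instance

-- ===== CLAIM (what is proved, stated in full; the proofs are below) =====
def Claim_equal_select_target_path_py : Prop := ∀ (paths : List String) (audit_key : String), Dom_select_target_path_py paths audit_key → Spec_select_target_path_py paths audit_key (select_target_path_py paths audit_key)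

-- ===== LEMMAS AND PROOFS =====

-- the combined disjunction of A's if-chain conditions
def pvCond (k p : String) : Bool :=
  (k == "systemd_persist" && PySem.Str.isIn "/systemd/" p) ||
  ((k == "cron_persist" || k == "user_cron") && PySem.Str.isIn "cron" p) ||
  (k == "ssh_keys" && PySem.Str.endswith p "authorized_keys") ||
  (k == "shell_rc" && (p == "/root/.bashrc" || p == "/root/.profile")) ||
  (k == "rc_local" && PySem.Str.endswith p "/etc/rc.local") ||
  (k == "initd_persist" && PySem.Str.isIn "/init.d/" p)

lemma pvALoop_eq_find? (k : String) (l : List String) :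
    pvALoop k l = l.find? (pvCond k) := by
  induction l with
  | nil => rfl
  | cons p rest ih =>
    cases e1 : (k == "systemd_persist" && PySem.Str.isIn "/systemd/" p) <;>
    cases e2 : ((k == "cron_persist" || k == "user_cron") && PySem.Str.isIn "cron" p) <;>
    cases e3 : (k == "ssh_keys" && PySem.Str.endswith p "authorized_keys") <;>
    cases e4 : (k == "shell_rc" && (p == "/root/.bashrc" || p == "/root/.profile")) <;>
    cases e5 : (k == "rc_local" && PySem.Str.endswith p "/etc/rc.local") <;>
    cases e6 : (k == "initd_persist" && PySem.Str.isIn "/init.d/" p) <;>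
    simp only [pvALoop, List.find?, pvCond, ih, e1, e2, e3, e4, e5, e6] <;> rfl

-- B's predicate lookup, applied as in the fold, equals A's combined condition
lemma pvPredsMk : pvPreds = PySem.Dict.mk
  [ ("systemd_persist", fun p => PySem.Str.isIn "/systemd/" p)
  , ("cron_persist", fun p => PySem.Str.isIn "cron" p)
  , ("user_cron", fun p => PySem.Str.isIn "cron" p)
  , ("ssh_keys", fun p => PySem.Str.endswith p "authorized_keys")
  , ("shell_rc", fun p => p == "/root/.bashrc" || p == "/root/.profile")
  , ("rc_local", fun p => PySem.Str.endswith p "/etc/rc.local")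
  , ("initd_persist", fun p => PySem.Str.isIn "/init.d/" p) ] := rfl

-- B's predicate lookup, applied as in the fold, equals A's combined condition
lemma pvPred_eq (k p : String) :
    (match pvPreds.get? k with | some f => f p | none => false) = pvCond k p := by
  by_cases h1 : k = "systemd_persist"
  · subst h1; rw [pvPredsMk]; simp [PySem.Dict.get?_mk_cons, pvCond]
  · by_cases h2 : k = "cron_persist"
    · subst h2; rw [pvPredsMk]; simp [PySem.Dict.get?_mk_cons, pvCond]
    · by_cases h3 : k = "user_cron"
      · subst h3; rw [pvPredsMk]; simp [PySem.Dict.get?_mk_cons, pvCond]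
      · by_cases h4 : k = "ssh_keys"
        · subst h4; rw [pvPredsMk]; simp [PySem.Dict.get?_mk_cons, pvCond]
        · by_cases h5 : k = "shell_rc"
          · subst h5; rw [pvPredsMk]; simp [PySem.Dict.get?_mk_cons, pvCond]
          · by_cases h6 : k = "rc_local"
            · subst h6; rw [pvPredsMk]; simp [PySem.Dict.get?_mk_cons, pvCond]
            · by_cases h7 : k = "initd_persist"
              · subst h7; rw [pvPredsMk]; simp [PySem.Dict.get?_mk_cons, pvCond]
              · have hn : pvPreds.get? k = none := by
                  rw [pvPredsMk]
                  simp [PySem.Dict.get?,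
                    Ne.symm h1, Ne.symm h2, Ne.symm h3, Ne.symm h4, Ne.symm h5,
                    Ne.symm h6, Ne.symm h7]
                rw [hn]
                simp [pvCond, h1, h2, h3, h4, h5, h6, h7]

-- the guarded fold over paths equals the unguarded fold over the filtered list
lemma pvFold_filter (k : String) (paths : List String) (st : String × Option String) :
    paths.foldl
      (fun (st : String × Option String) p =>
        if p != "" && p != "(null)" then
          (p, if pvCond k p then some p else st.2)
        else st) st
    = (paths.filter (fun p => p != "" && p != "(null)")).foldl
        (fun (st : String × Option String) p =>
          (p, if pvCond k p then some p else st.2)) st := by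
  induction paths generalizing st with
  | nil => rfl
  | cons p rest ih =>
    cases h : (p != "" && p != "(null)") <;>
      simp only [List.foldl_cons, List.filter_cons, h, if_true, if_false,
        Bool.false_eq_true] <;>
      exact ih _

-- the forward fold computes (last element, last match) of the candidate list
lemma pvFold_spec (k : String) (c : List String) (l0 : String) (h0 : Option String) :
    c.foldl (fun (st : String × Option String) p =>
        (p, if pvCond k p then some p else st.2)) (l0, h0)
    = (c.getLastD l0, (c.reverse.find? (pvCond k)).or h0) := by
  induction c generalizing l0 h0 with
  | nil => rfl
  | cons p rest ih =>
    simp only [List.foldl_cons, ih, List.reverse_cons, List.find?_append,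
      List.getLastD_cons]
    congr 1
    cases hf : rest.reverse.find? (pvCond k) <;>
      by_cases hp : pvCond k p = true <;>
      simp [List.find?, hp, Option.or]

theorem pv_main (paths : List String) (audit_key : String) :
    select_target_path_py paths audit_key = select_target_path_py_alt paths audit_key := by
  unfold select_target_path_py select_target_path_py_alt
  simp only [pvPred_eq, pvFold_filter, pvFold_spec, pvALoop_eq_find?]
  set c := paths.filter (fun p => p != "" && p != "(null)") with hc
  by_cases h : c.isEmpty
  · have : c = [] := List.isEmpty_iff.mp h
    simp [this]
  · simp only [h, Option.or_none]
    cases c.reverse.find? (pvCond audit_key) <;> rfl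

-- ===== VERDICT (by name: the statement is the Claim_ definition above) =====
theorem select_target_path_py_spec : Claim_equal_select_target_path_py := by
  intro paths audit_key _
  exact pv_main paths audit_key
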